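-- pv_equiv track=rewrite | github.com/carloscz25/basicscraping | reducciongraficos/utils.py | concatena_segmentos_contiguos_de_igual_pendiente
-- ===== SOURCE A (Python) =====
-- def concatena_segmentos_contiguos_de_igual_pendiente(timestamps, valores):
--     """
--     Metodo reduce array de timestamps y valores a segmentos lineales concatenados contiguos cuando
--     la pendiente coincide. El resultado debería ser una secuencia de segmenos lineales, alternando la
--     pendiente de los mismos positiva y negativa (+-+-+-+-+-+-+-)
--     :param timestamps: array-like de timestamps
--     :param valores: array-like de valores
--     :return: sendos arrays de timestamps y valores reflejando la estructura alternada de segmentos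
--     positivos y negativos
--     """
--     c_ts = []
--     c_v = []
--     buffer = ""
--     indexdesde, indexhasta = -1, -1
--     for i in range(1,len(timestamps)):
--         valorde, valora = valores[i-1], valores[i]
--         pendienteactual = ""
--         if valora > valorde:
--             pendienteactual = "+"
--         elif valora < valorde:
--             pendienteactual = "-"
--         else:
--             pendienteactual = "="
--         if (buffer == ""):
--             buffer = pendienteactual
--             indexdesde = i
--             c_ts.append(timestamps[i-1])
--             c_v.append(valores[i-1])
--         else:
--             if buffer == pendienteactual:
--                 pass
--             else:
--                 c_ts.append(timestamps[i-1])
--                 c_v.append(valores[i-1])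
--                 buffer = pendienteactual
--     c_ts.append(timestamps[len(timestamps)-1])
--     c_v.append(valores[len(valores) - 1])
--     return c_ts, c_v
-- ===== SOURCE B (Python) =====
-- def concatena_segmentos_contiguos_de_igual_pendiente(timestamps, valores):
--     n = len(timestamps)
--     signs = [(valores[i] > valores[i - 1]) - (valores[i] < valores[i - 1])
--              for i in range(1, n)]
--     if signs:
--         keep = [0] + [k for k in range(1, len(signs)) if signs[k] != signs[k - 1]]
--     else:
--         keep = []
--     c_ts = [timestamps[k] for k in keep]
--     c_v = [valores[k] for k in keep]
--     c_ts.append(timestamps[n - 1])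
--     c_v.append(valores[len(valores) - 1])
--     return c_ts, c_v
-- ===== Notes on version B (the rewrite author's own statement) =====
-- stated objective: idiomatic
-- what changed: B replaces A's single stateful loop (string buffer holding the previous slope) by a two-phase pipeline: first build the list of slope signs as ints, then select the kept indices (run starts) by comparing adjacent signs, and map those indices over both arrays.
import Mathlib
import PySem

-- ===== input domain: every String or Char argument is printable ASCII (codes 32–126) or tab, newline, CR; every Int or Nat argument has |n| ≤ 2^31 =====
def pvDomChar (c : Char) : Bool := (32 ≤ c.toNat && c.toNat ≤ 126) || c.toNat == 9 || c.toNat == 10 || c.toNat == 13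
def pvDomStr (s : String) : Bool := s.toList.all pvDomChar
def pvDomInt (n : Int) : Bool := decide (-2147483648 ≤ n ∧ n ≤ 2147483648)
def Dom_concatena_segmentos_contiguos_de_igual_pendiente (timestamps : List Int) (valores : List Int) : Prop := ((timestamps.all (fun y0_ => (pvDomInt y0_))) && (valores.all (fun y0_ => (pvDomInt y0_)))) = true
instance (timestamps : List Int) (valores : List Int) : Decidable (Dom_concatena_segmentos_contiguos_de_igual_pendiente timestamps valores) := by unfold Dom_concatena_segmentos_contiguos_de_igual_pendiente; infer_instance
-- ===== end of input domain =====

-- B replaces A's single stateful loop (string buffer remembering the previous slope sign) by a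
-- two-phase pipeline: build the list of slope signs, pick the change indices, map them over both
-- arrays; objective: more idiomatic, same O(n) cost.

-- ===== PORT A =====
-- slope marker: "+" / "-" / "=" exactly as A computes pendienteactual
def pendiente_str (valorde valora : Int) : String :=
  if valora > valorde then "+" else if valora < valorde then "-" else "="

-- one iteration of A's for-loop; state = (c_ts, c_v, buffer, indexdesde)
def cscdp_stepA (timestamps valores : List Int) (s : List Int × List Int × String × Int) (i : Int) :
    List Int × List Int × String × Int :=
  let valorde := PySem.List.pyGetD valores (i - 1) 0
  let valora := PySem.List.pyGetD valores i 0
  let pendienteactual := pendiente_str valorde valora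
  if s.2.2.1 = "" then
    (s.1 ++ [PySem.List.pyGetD timestamps (i - 1) 0], s.2.1 ++ [valorde], pendienteactual, i)
  else if s.2.2.1 = pendienteactual then s
  else
    (s.1 ++ [PySem.List.pyGetD timestamps (i - 1) 0], s.2.1 ++ [valorde], pendienteactual, s.2.2.2)

def concatena_segmentos_contiguos_de_igual_pendiente (timestamps : List Int) (valores : List Int) : List Int × List Int :=
  let st := (PySem.List.pyRange 1 (timestamps.length : Int) 1).foldl
              (cscdp_stepA timestamps valores) ([], [], "", -1)
  (st.1 ++ [PySem.List.pyGetD timestamps ((timestamps.length : Int) - 1) 0],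
   st.2.1 ++ [PySem.List.pyGetD valores ((valores.length : Int) - 1) 0])

-- ===== PORT B =====
-- int slope sign: (valora > valorde) - (valora < valorde)
def pendiente_int (a b : Int) : Int :=
  (if b > a then (1 : Int) else 0) - (if b < a then 1 else 0)

def concatena_segmentos_contiguos_de_igual_pendiente_alt (timestamps : List Int) (valores : List Int) : List Int × List Int :=
  let n : Int := timestamps.length
  let signs := (PySem.List.pyRange 1 n 1).map
    (fun i => pendiente_int (PySem.List.pyGetD valores (i - 1) 0) (PySem.List.pyGetD valores i 0))
  let keep : List Int :=
    if signs.isEmpty then []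
    else 0 :: (PySem.List.pyRange 1 (signs.length : Int) 1).filter
      (fun k => PySem.List.pyGetD signs k 0 != PySem.List.pyGetD signs (k - 1) 0)
  let c_ts := keep.map (fun k => PySem.List.pyGetD timestamps k 0)
  let c_v := keep.map (fun k => PySem.List.pyGetD valores k 0)
  (c_ts ++ [PySem.List.pyGetD timestamps (n - 1) 0],
   c_v ++ [PySem.List.pyGetD valores ((valores.length : Int) - 1) 0])

-- ===== PRECONDITION & SPEC =====
-- Pre_ = exactly the inputs on which the Python A returns: A raises IndexError when timestamps is
-- empty (final append) or when valores is shorter than timestamps (valores[i] in the loop).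
def Pre_concatena_segmentos_contiguos_de_igual_pendiente (timestamps : List Int) (valores : List Int) : Prop :=
  1 ≤ timestamps.length ∧ timestamps.length ≤ valores.length
instance (timestamps : List Int) (valores : List Int) : Decidable (Pre_concatena_segmentos_contiguos_de_igual_pendiente timestamps valores) := by unfold Pre_concatena_segmentos_contiguos_de_igual_pendiente; infer_instance

def pvWitness_concatena_segmentos_contiguos_de_igual_pendiente : List Int × List Int :=
  ([10, 20, 30, 40], [1, 2, 3, 1])

def Spec_concatena_segmentos_contiguos_de_igual_pendiente (timestamps : List Int) (valores : List Int) (out : List Int × List Int) : Prop := out = concatena_segmentos_contiguos_de_igual_pendiente_alt timestamps valores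
instance (timestamps : List Int) (valores : List Int) (out : List Int × List Int) : Decidable (Spec_concatena_segmentos_contiguos_de_igual_pendiente timestamps valores out) := by unfold Spec_concatena_segmentos_contiguos_de_igual_pendiente; infer_instance

-- ===== CLAIM (what is proved, stated in full; the proofs are below) =====
def Claim_equal_concatena_segmentos_contiguos_de_igual_pendiente : Prop := ∀ (timestamps : List Int) (valores : List Int), Dom_concatena_segmentos_contiguos_de_igual_pendiente timestamps valores → Pre_concatena_segmentos_contiguos_de_igual_pendiente timestamps valores → Spec_concatena_segmentos_contiguos_de_igual_pendiente timestamps valores (concatena_segmentos_contiguos_de_igual_pendiente timestamps valores)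

-- ===== LEMMAS AND PROOFS =====

-- the kept indices of B, expressed directly through the slope signs of valores (prefix of length N)
def cscdp_keep (valores : List Int) (N : Nat) : List Int :=
  if N < 2 then []
  else 0 :: (PySem.List.pyRange 1 ((N : Int) - 1) 1).filter
    (fun k => pendiente_int (PySem.List.pyGetD valores k 0) (PySem.List.pyGetD valores (k + 1) 0)
           != pendiente_int (PySem.List.pyGetD valores (k - 1) 0) (PySem.List.pyGetD valores k 0))

-- A's buffer after processing i = 1 .. N-1
def cscdp_buf (valores : List Int) (N : Nat) : String :=
  if N < 2 then ""
  else pendiente_str (PySem.List.pyGetD valores ((N : Int) - 2) 0) (PySem.List.pyGetD valores ((N : Int) - 1) 0)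

lemma pendiente_str_ne_empty (a b : Int) : pendiente_str a b ≠ "" := by
  unfold pendiente_str; split_ifs <;> decide

lemma pendiente_eq_iff (a b c d : Int) :
    pendiente_str a b = pendiente_str c d ↔ pendiente_int a b = pendiente_int c d := by
  unfold pendiente_str pendiente_int
  split_ifs <;> simp_all <;> omega
lemma cscdp_loopA_char (timestamps valores : List Int) (N : Nat) :
    (PySem.List.pyRange 1 (N : Int) 1).foldl (cscdp_stepA timestamps valores) ([], [], "", -1) =
      ((cscdp_keep valores N).map (fun k => PySem.List.pyGetD timestamps k 0),
       (cscdp_keep valores N).map (fun k => PySem.List.pyGetD valores k 0),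
       cscdp_buf valores N,
       if N < 2 then -1 else 1) := by
  induction N with
  | zero => simp [PySem.List.pyRange_one_eq_nil, cscdp_keep, cscdp_buf]
  | succ N ih =>
    rcases Nat.lt_or_ge N 1 with h1 | h1
    · interval_cases N
      simp [PySem.List.pyRange_one_eq_nil, cscdp_keep, cscdp_buf]
    rcases Nat.lt_or_ge N 2 with h2 | h2
    · interval_cases N
      have h11 : ((1 + 1 : Nat) : Int) = 1 + 1 := by norm_num
      rw [h11, PySem.List.pyRange_one_singleton]
      simp [cscdp_stepA, cscdp_keep, cscdp_buf, PySem.List.pyRange_one_eq_nil]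
    · have hN1 : (1 : Int) ≤ (N : Int) := by exact_mod_cast Nat.one_le_of_lt h2
      have hsplit : PySem.List.pyRange 1 ((N + 1 : Nat) : Int) 1
          = PySem.List.pyRange 1 (N : Int) 1 ++ [(N : Int)] := by
        push_cast
        exact PySem.List.pyRange_one_succ_right hN1
      rw [hsplit, List.foldl_append, ih]
      have hbufN : cscdp_buf valores N
          = pendiente_str (PySem.List.pyGetD valores ((N:Int)-2) 0) (PySem.List.pyGetD valores ((N:Int)-1) 0) := by
        unfold cscdp_buf; rw [if_neg (by omega)]
      have hbufS : cscdp_buf valores (N+1)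
          = pendiente_str (PySem.List.pyGetD valores ((N:Int)-1) 0) (PySem.List.pyGetD valores (N:Int) 0) := by
        unfold cscdp_buf
        rw [if_neg (by omega)]
        have e1 : ((N+1 : Nat):Int) - 2 = (N:Int) - 1 := by push_cast; ring
        have e2 : ((N+1 : Nat):Int) - 1 = (N:Int) := by push_cast; ring
        rw [e1, e2]
      have hkeepS : cscdp_keep valores (N+1) = cscdp_keep valores N ++
          (if (pendiente_int (PySem.List.pyGetD valores ((N:Int)-1) 0) (PySem.List.pyGetD valores (N:Int) 0)
              != pendiente_int (PySem.List.pyGetD valores ((N:Int)-2) 0) (PySem.List.pyGetD valores ((N:Int)-1) 0))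
           then [(N:Int)-1] else []) := by
        unfold cscdp_keep
        rw [if_neg (by omega), if_neg (by omega)]
        have hcast : ((N+1 : Nat):Int) - 1 = ((N:Int) - 1) + 1 := by push_cast; ring
        rw [hcast, PySem.List.pyRange_one_succ_right (by omega), List.filter_append]
        have e1 : (N:Int) - 1 + 1 = (N:Int) := by ring
        have e2 : (N:Int) - 1 - 1 = (N:Int) - 2 := by ring
        simp only [List.filter_cons, List.filter_nil, e1, e2, List.cons_append]
      simp only [List.foldl_cons, List.foldl_nil]
      have h4 : (if N < 2 then (-1 : Int) else 1) = 1 := if_neg (by omega)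
      have h5 : (if N + 1 < 2 then (-1 : Int) else 1) = 1 := if_neg (by omega)
      rw [h4, h5, hbufN, hbufS, hkeepS]
      by_cases heq : pendiente_str (PySem.List.pyGetD valores ((N:Int)-2) 0) (PySem.List.pyGetD valores ((N:Int)-1) 0)
          = pendiente_str (PySem.List.pyGetD valores ((N:Int)-1) 0) (PySem.List.pyGetD valores (N:Int) 0)
      · have hbne : (pendiente_int (PySem.List.pyGetD valores ((N:Int)-1) 0) (PySem.List.pyGetD valores (N:Int) 0)
            != pendiente_int (PySem.List.pyGetD valores ((N:Int)-2) 0) (PySem.List.pyGetD valores ((N:Int)-1) 0)) = false := by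
          rw [((pendiente_eq_iff _ _ _ _).mp heq).symm]
          exact bne_self_eq_false _
        simp only [cscdp_stepA]
        rw [if_neg (pendiente_str_ne_empty _ _), if_pos heq, hbne]
        simp only [Bool.false_eq_true, if_false, List.append_nil, heq]
      · have hbne : (pendiente_int (PySem.List.pyGetD valores ((N:Int)-1) 0) (PySem.List.pyGetD valores (N:Int) 0)
            != pendiente_int (PySem.List.pyGetD valores ((N:Int)-2) 0) (PySem.List.pyGetD valores ((N:Int)-1) 0)) = true := by
          exact bne_iff_ne.mpr (fun h => heq ((pendiente_eq_iff _ _ _ _).mpr h.symm))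
        simp only [cscdp_stepA]
        rw [if_neg (pendiente_str_ne_empty _ _), if_neg heq, hbne]
        simp only [if_true, List.map_append, List.map_cons, List.map_nil]

lemma cscdp_keep_eq (timestamps valores : List Int) :
    (if ((PySem.List.pyRange 1 (timestamps.length : Int) 1).map
          (fun i => pendiente_int (PySem.List.pyGetD valores (i - 1) 0) (PySem.List.pyGetD valores i 0))).isEmpty
     then ([] : List Int)
     else 0 :: (PySem.List.pyRange 1 ((((PySem.List.pyRange 1 (timestamps.length : Int) 1).map
          (fun i => pendiente_int (PySem.List.pyGetD valores (i - 1) 0) (PySem.List.pyGetD valores i 0))).length : Int)) 1).filter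
       (fun k => PySem.List.pyGetD ((PySem.List.pyRange 1 (timestamps.length : Int) 1).map
            (fun i => pendiente_int (PySem.List.pyGetD valores (i - 1) 0) (PySem.List.pyGetD valores i 0))) k 0
          != PySem.List.pyGetD ((PySem.List.pyRange 1 (timestamps.length : Int) 1).map
            (fun i => pendiente_int (PySem.List.pyGetD valores (i - 1) 0) (PySem.List.pyGetD valores i 0))) (k - 1) 0))
    = cscdp_keep valores timestamps.length := by
  have hlen : ((PySem.List.pyRange 1 (timestamps.length : Int) 1).map
      (fun i => pendiente_int (PySem.List.pyGetD valores (i - 1) 0) (PySem.List.pyGetD valores i 0))).length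
      = (((timestamps.length : Int)) - 1).toNat := by
    rw [List.length_map, PySem.List.length_pyRange_one]
  by_cases h2 : timestamps.length < 2
  · have he : ((PySem.List.pyRange 1 (timestamps.length : Int) 1).map
        (fun i => pendiente_int (PySem.List.pyGetD valores (i - 1) 0) (PySem.List.pyGetD valores i 0))).isEmpty = true := by
      rw [List.isEmpty_iff_length_eq_zero, hlen]; omega
    rw [if_pos he]
    unfold cscdp_keep
    rw [if_pos h2]
  · have he : ((PySem.List.pyRange 1 (timestamps.length : Int) 1).map
        (fun i => pendiente_int (PySem.List.pyGetD valores (i - 1) 0) (PySem.List.pyGetD valores i 0))).isEmpty = false := by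
      rw [Bool.eq_false_iff]
      intro h
      rw [List.isEmpty_iff_length_eq_zero, hlen] at h
      omega
    rw [if_neg (by simp [he])]
    unfold cscdp_keep
    rw [if_neg h2, hlen]
    have hcast : (((((timestamps.length : Int)) - 1).toNat : Int)) = (timestamps.length : Int) - 1 := by omega
    rw [hcast]
    congr 1
    apply List.filter_congr
    intro k hk
    rw [PySem.List.mem_pyRange_one] at hk
    have hk1 : 1 ≤ k := hk.1
    have hk2 : k < (timestamps.length : Int) - 1 := hk.2
    have e1 : k = ((k.toNat : Nat) : Int) := by omega
    rw [e1]
    have e2 : ((k.toNat : Nat) : Int) - 1 = (((k.toNat - 1 : Nat)) : Int) := by omega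
    rw [e2]
    rw [PySem.List.pyGetD_map_pyRange_one _ _ _ _ _ (by omega), PySem.List.pyGetD_map_pyRange_one _ _ _ _ _ (by omega)]
    have e3 : (1 : Int) + (k.toNat : Int) - 1 = (k.toNat : Int) := by omega
    have e4 : (1 : Int) + (k.toNat : Int) = (k.toNat : Int) + 1 := by omega
    have e5 : (1 : Int) + ((k.toNat - 1 : Nat) : Int) - 1 = (k.toNat : Int) - 1 := by omega
    have e6 : (1 : Int) + ((k.toNat - 1 : Nat) : Int) = (k.toNat : Int) := by omega
    rw [e3, e4, e5, e6, e2]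

lemma cscdp_ports_agree (timestamps valores : List Int) :
    concatena_segmentos_contiguos_de_igual_pendiente timestamps valores =
      concatena_segmentos_contiguos_de_igual_pendiente_alt timestamps valores := by
  unfold concatena_segmentos_contiguos_de_igual_pendiente concatena_segmentos_contiguos_de_igual_pendiente_alt
  simp only []
  rw [cscdp_loopA_char timestamps valores timestamps.length, cscdp_keep_eq timestamps valores]

-- ===== VERDICT (by name: the statement is the Claim_ definition above) =====
theorem concatena_segmentos_contiguos_de_igual_pendiente_spec : Claim_equal_concatena_segmentos_contiguos_de_igual_pendiente := by
  intro timestamps valores _ _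
  exact cscdp_ports_agree timestamps valores
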